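-- pv_equiv track=rewrite | github.com/Nuan59/NPG-POS | backend/api/views/ReportsView.py | decode_price
-- ===== SOURCE A (Python) =====
-- CODE_MAP = {
--     'N': '1',
--     'C': '2',
--     'I': '3',
--     'O': '4',
--     'W': '5',
--     'M': '6',
--     'A': '7',
--     'E': '8',
--     'Z': '9',
--     'T': '0',
-- }
--
-- def decode_price(encoded):
--     """
--     แปลงรหัสเป็นตัวเลข
--     NOWTT = 14500
--     CWTTT = 25000
--     """
--     if not encoded or not isinstance(encoded, str):
--         return 0
--
--     upper = encoded.strip().upper()
--     decoded = ''
--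
--     for char in upper:
--         if char in CODE_MAP:
--             decoded += CODE_MAP[char]
--         else:
--             return 0  # ถ้าเจอตัวอักษรแปลก ให้คืน 0
--
--     try:
--         return int(decoded)
--     except:
--         return 0
-- ===== SOURCE B (Python) =====
-- CODE_MAP = {
--     'N': '1',
--     'C': '2',
--     'I': '3',
--     'O': '4',
--     'W': '5',
--     'M': '6',
--     'A': '7',
--     'E': '8',
--     'Z': '9',
--     'T': '0',
-- }
--
-- _TABLE = str.maketrans(CODE_MAP)
--
--
-- def decode_price(encoded):
--     if not encoded or not isinstance(encoded, str):
--         return 0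
--     upper = encoded.strip().upper()
--     if not upper or not set(upper) <= CODE_MAP.keys():
--         return 0
--     return int(upper.translate(_TABLE))
-- ===== Notes on version B (the rewrite author's own statement) =====
-- stated objective: idiomatic
-- what changed: Replaces the explicit character loop that accumulates a digit string with early return by a set-subset validity guard (set(upper) <= CODE_MAP.keys()) followed by a single str.translate call and a direct int(), with no try/except and no per-character control flow.
import Mathlib
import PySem

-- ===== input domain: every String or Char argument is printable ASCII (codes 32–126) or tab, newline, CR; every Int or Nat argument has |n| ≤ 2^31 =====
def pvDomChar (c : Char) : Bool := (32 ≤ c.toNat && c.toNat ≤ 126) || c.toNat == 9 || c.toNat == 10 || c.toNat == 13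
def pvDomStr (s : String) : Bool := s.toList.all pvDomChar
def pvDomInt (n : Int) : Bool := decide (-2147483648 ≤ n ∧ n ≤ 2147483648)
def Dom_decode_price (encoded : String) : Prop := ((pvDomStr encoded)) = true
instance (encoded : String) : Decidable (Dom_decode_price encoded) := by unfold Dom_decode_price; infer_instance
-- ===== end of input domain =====

-- B replaces A's accumulate-a-digit-string loop with early return by a set-subset
-- validity guard plus one translate pass and a direct int(); return values agree on all inputs.

-- ===== PORT A =====
-- CODE_MAP: module-level dict of single-character keys/values, shared context of both versions
def codeMap : PySem.Dict Char Char :=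
  PySem.Dict.ofList [('N', '1'), ('C', '2'), ('I', '3'), ('O', '4'), ('W', '5'),
                     ('M', '6'), ('A', '7'), ('E', '8'), ('Z', '9'), ('T', '0')]

-- the 'for char in upper' loop: 'if char in CODE_MAP: decoded += CODE_MAP[char] else: return 0'
-- (membership test + guarded lookup fused into one get?; none = the early 'return 0')
def decodeLoopA : List Char → List Char → Option (List Char)
  | [], acc => some acc
  | c :: cs, acc =>
    match codeMap.get? c with
    | some d => decodeLoopA cs (acc ++ [d])
    | none => none

def decode_price (encoded : String) : Int :=
  if encoded = "" then 0          -- 'not encoded' (isinstance is always true for a str argument)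
  else
    let upper := PySem.Chars.upper (PySem.Chars.strip encoded.toList)
    match decodeLoopA upper [] with
    | none => 0
    | some decoded =>
      match PySem.Int.ofChars? decoded with   -- try: return int(decoded)
      | some n => n
      | none => 0                             -- except: return 0

-- ===== PORT B =====
-- str.translate(_TABLE): mapped characters are replaced, all others kept
def translateChar (c : Char) : Char := (codeMap.get? c).getD c

def decode_price_alt (encoded : String) : Int :=
  if encoded = "" then 0
  else
    let upper := PySem.Chars.upper (PySem.Chars.strip encoded.toList)
    if upper.isEmpty || !((PySem.Set.ofList upper).all fun c => codeMap.contains c) then 0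
    else (PySem.Int.ofChars? (upper.map translateChar)).getD 0
      -- int(...) : on this branch the translated string is nonempty all-digits, so int never raises;
      -- getD's default is unreachable

-- ===== PRECONDITION & SPEC =====
def Spec_decode_price (encoded : String) (out : Int) : Prop := out = decode_price_alt encoded
instance (encoded : String) (out : Int) : Decidable (Spec_decode_price encoded out) := by unfold Spec_decode_price; infer_instance

-- ===== CLAIM (what is proved, stated in full; the proofs are below) =====
def Claim_equal_decode_price : Prop := ∀ (encoded : String), Dom_decode_price encoded → Spec_decode_price encoded (decode_price encoded)

-- ===== LEMMAS AND PROOFS =====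

-- A's loop succeeds iff every character is a key, and then returns acc ++ the translation
theorem decodeLoopA_eq (u acc : List Char) :
    decodeLoopA u acc =
      if u.all (fun c => codeMap.contains c) then some (acc ++ u.map translateChar) else none := by
  induction u generalizing acc with
  | nil => simp [decodeLoopA]
  | cons c cs ih =>
    rw [decodeLoopA]
    rcases h : codeMap.get? c with _ | d
    · have hc : codeMap.contains c = false := by
        rw [PySem.Dict.contains_eq_isSome_get?, h]; rfl
      simp [hc]
    · have hc : codeMap.contains c = true := by
        rw [PySem.Dict.contains_eq_isSome_get?, h]; rfl
      have ht : translateChar c = d := by simp [translateChar, h]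
      simp [ih, hc, ht]

-- the subset guard of B is exactly 'every character is a key'
theorem subset_guard_eq (u : List Char) :
    ((PySem.Set.ofList u).all fun c => codeMap.contains c) = u.all fun c => codeMap.contains c := by
  rcases h : u.all fun c => codeMap.contains c with _ | _
  · rw [List.all_eq_false] at h
    rcases h with ⟨c, hc, hfc⟩
    rw [List.all_eq_false]
    exact ⟨c, (PySem.Set.mem_ofList _ _).mpr hc, hfc⟩
  · rw [List.all_eq_true] at h
    rw [List.all_eq_true]
    intro c hc
    exact h c ((PySem.Set.mem_ofList _ _).mp hc)

-- ===== VERDICT (by name: the statement is the Claim_ definition above) =====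
theorem decode_price_spec : Claim_equal_decode_price := by
  intro encoded _
  unfold Spec_decode_price decode_price decode_price_alt
  by_cases he : encoded = ""
  · simp [he]
  · simp only [he, if_false]
    rw [decodeLoopA_eq, subset_guard_eq]
    rcases hall : (PySem.Chars.upper (PySem.Chars.strip encoded.toList)).all
        (fun c => codeMap.contains c) with _ | _
    · simp
    · simp only [if_true, Bool.not_true, Bool.or_false, List.nil_append]
      rcases hu : PySem.Chars.upper (PySem.Chars.strip encoded.toList) with _ | ⟨c, cs⟩
      · decide
      · simp only [List.isEmpty_cons]
        rcases PySem.Int.ofChars? ((c :: cs).map translateChar) with _ | n <;> rfl
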